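-- pv_equiv track=rewrite | github.com/pulp-platform/dory_examples | dims.py | MobileNetV1_dimslist
-- ===== SOURCE A (Python) =====
-- def MobileNetV1_block(input_size, ki, ko, s):
--     return [
--         [input_size     , input_size     , ki, ki, 3, ki, 1, s],
--         [input_size // s, input_size // s, ki, ko, 1,  1, 0, 1]
--     ]
--
-- def MobileNetV1_dimslist(input_size):
--     l = []
--     l += [[input_size, input_size, 3, 32, 3, 1, 1, 2]]
--     l += MobileNetV1_block(input_size //  2,   32,   64, 1)
--     k = 64
--     h = input_size // 2
--     for i in range(4):
--         l += MobileNetV1_block(h, k, 2*k, 2); h //= 2; k *= 2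
--         l += MobileNetV1_block(h, k,   k, 1)
--     return l
-- ===== SOURCE B (Python) =====
-- def MobileNetV1_dimslist(input_size):
--     # spec table: (spatial size, in channels, out channels, stride) for the
--     # stem's follower and all 10 depthwise blocks, computed in closed form
--     specs = [(input_size // 2, 32, 64, 1)]
--     for i in range(4):
--         k = 64 * 2**i
--         specs.append((input_size // (2 * 2**i), k, 2 * k, 2))
--         specs.append((input_size // (4 * 2**i), 2 * k, 2 * k, 1))
--     rows = [[input_size, input_size, 3, 32, 3, 1, 1, 2]]
--     for h, ki, ko, s in specs:
--         rows.append([h, h, ki, ki, 3, ki, 1, s])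
--         rows.append([h // s, h // s, ki, ko, 1, 1, 0, 1])
--     return rows
-- ===== Notes on version B (the rewrite author's own statement) =====
-- stated objective: alternative
-- what changed: Replaces A's imperative loop that threads mutable halving/doubling state while appending block rows with a two-phase design: first build a declarative spec table of (spatial size, in channels, out channels, stride) entries computed in closed form from the block index, then expand every spec into its two dimension rows in one uniform pass.
import Mathlib
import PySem

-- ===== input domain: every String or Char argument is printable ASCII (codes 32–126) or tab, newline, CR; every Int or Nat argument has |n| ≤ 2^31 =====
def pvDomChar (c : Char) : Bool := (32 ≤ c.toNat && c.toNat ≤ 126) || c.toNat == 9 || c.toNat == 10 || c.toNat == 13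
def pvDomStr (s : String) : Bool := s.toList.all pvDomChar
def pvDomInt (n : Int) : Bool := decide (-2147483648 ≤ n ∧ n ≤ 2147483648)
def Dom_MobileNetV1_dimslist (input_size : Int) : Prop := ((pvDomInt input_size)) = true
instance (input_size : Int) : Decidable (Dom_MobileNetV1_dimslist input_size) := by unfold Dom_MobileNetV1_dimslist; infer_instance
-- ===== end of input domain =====

-- B replaces A's imperative h//=2, k*=2 state-threading loop by a declarative
-- spec table (closed-form sizes/channels/strides) plus one uniform expansion pass
-- over it; objective: alternative decomposition (same cost).


-- ===== PORT A =====
def MobileNetV1_block (input_size ki ko s : Int) : List (List Int) :=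
  [[input_size, input_size, ki, ki, 3, ki, 1, s],
   [PySem.Int.floordiv input_size s, PySem.Int.floordiv input_size s, ki, ko, 1, 1, 0, 1]]

def MobileNetV1_dimslist (input_size : Int) : List (List Int) :=
  let l : List (List Int) := []
  let l := l ++ [[input_size, input_size, 3, 32, 3, 1, 1, 2]]
  let l := l ++ MobileNetV1_block (PySem.Int.floordiv input_size 2) 32 64 1
  let k : Int := 64
  let h : Int := PySem.Int.floordiv input_size 2
  let st := (PySem.List.pyRange 0 4 1).foldl
    (fun (st : List (List Int) × Int × Int) _ =>
      let l := st.1; let k := st.2.1; let h := st.2.2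
      let l := l ++ MobileNetV1_block h k (2 * k) 2
      let h := PySem.Int.floordiv h 2
      let k := k * 2
      let l := l ++ MobileNetV1_block h k k 1
      (l, k, h)) (l, k, h)
  st.1

-- ===== PORT B =====
def MobileNetV1_dimslist_alt (input_size : Int) : List (List Int) :=
  let specs : List (Int × Int × Int × Int) := [(PySem.Int.floordiv input_size 2, 32, 64, 1)]
  let specs := (PySem.List.pyRange 0 4 1).foldl
    (fun (sp : List (Int × Int × Int × Int)) i =>
      let k : Int := 64 * 2 ^ i.toNat
      let sp := sp ++ [(PySem.Int.floordiv input_size (2 * 2 ^ i.toNat), k, 2 * k, 2)]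
      sp ++ [(PySem.Int.floordiv input_size (4 * 2 ^ i.toNat), 2 * k, 2 * k, 1)]) specs
  let rows : List (List Int) := [[input_size, input_size, 3, 32, 3, 1, 1, 2]]
  specs.foldl
    (fun (rows : List (List Int)) spec =>
      let h := spec.1; let ki := spec.2.1; let ko := spec.2.2.1; let s := spec.2.2.2
      let rows := rows ++ [[h, h, ki, ki, 3, ki, 1, s]]
      rows ++ [[PySem.Int.floordiv h s, PySem.Int.floordiv h s, ki, ko, 1, 1, 0, 1]]) rows

-- ===== PRECONDITION & SPEC =====
def Spec_MobileNetV1_dimslist (input_size : Int) (out : List (List Int)) : Prop := out = MobileNetV1_dimslist_alt input_size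
instance (input_size : Int) (out : List (List Int)) : Decidable (Spec_MobileNetV1_dimslist input_size out) := by unfold Spec_MobileNetV1_dimslist; infer_instance

-- ===== CLAIM (what is proved, stated in full; the proofs are below) =====
def Claim_equal_MobileNetV1_dimslist : Prop := ∀ (input_size : Int), Dom_MobileNetV1_dimslist input_size → Spec_MobileNetV1_dimslist input_size (MobileNetV1_dimslist input_size)

-- ===== LEMMAS AND PROOFS =====
-- ===== VERDICT (by name: the statement is the Claim_ definition above) =====
theorem MobileNetV1_dimslist_spec : Claim_equal_MobileNetV1_dimslist := by
  intro n _
  show MobileNetV1_dimslist n = MobileNetV1_dimslist_alt n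
  simp only [MobileNetV1_dimslist, MobileNetV1_dimslist_alt, MobileNetV1_block,
    show PySem.List.pyRange 0 4 1 = [0, 1, 2, 3] from by decide, List.foldl,
    show ((0 : Int)).toNat = 0 from rfl, show ((1 : Int)).toNat = 1 from rfl,
    show ((2 : Int)).toNat = 2 from rfl, show ((3 : Int)).toNat = 3 from rfl]
  norm_num [PySem.Int.floordiv_eq_ediv_of_pos (show (0 : Int) < 2 from by norm_num),
    PySem.Int.floordiv_eq_ediv_of_pos (show (0 : Int) < 4 from by norm_num),
    PySem.Int.floordiv_eq_ediv_of_pos (show (0 : Int) < 8 from by norm_num),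
    PySem.Int.floordiv_eq_ediv_of_pos (show (0 : Int) < 16 from by norm_num),
    PySem.Int.floordiv_eq_ediv_of_pos (show (0 : Int) < 32 from by norm_num)]
  omega
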